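-- pv_equiv track=rewrite | github.com/WVAviator/google-foobar-challenges | expanding-nebula.py | diveIntoTheNebula
-- ===== SOURCE A (Python) =====
-- def diveIntoTheNebula(gasArray, precomputedValues, currentIndex, previousValue, cache):
--     if currentIndex == -1:
--         return 1
--     if str(previousValue) + ":" + str(currentIndex) in cache:
--         return cache[str(previousValue) + ":" + str(currentIndex)]
--
--     count = 0
--
--     for x, y in precomputedValues[gasArray[currentIndex]]:
--         if x == previousValue:
--             count += diveIntoTheNebula(gasArray, precomputedValues, currentIndex - 1, y, cache)
--         elif y == previousValue:
--             count += diveIntoTheNebula(gasArray, precomputedValues, currentIndex - 1, x, cache)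
--
--     cache[str(previousValue) + ":" + str(currentIndex)] = count
--     return count
-- ===== SOURCE B (Python) =====
-- def diveIntoTheNebula(gasArray, precomputedValues, currentIndex, previousValue, cache):
--     if currentIndex == -1:
--         return 1
--     # Bottom-up DP over columns: counts[v] = number of valid fillings of columns
--     # 0..i-1 exposing value v at the boundary (missing entry = base layer value 1).
--     counts = {}
--     for i in range(currentIndex + 1):
--         pairs = precomputedValues[gasArray[i]]
--         if i == currentIndex:
--             targets = {previousValue}
--         else:
--             targets = {v for pair in precomputedValues[gasArray[i + 1]] for v in pair}
--         new = {}
--         for v in targets: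
--             key = str(v) + ":" + str(i)
--             if key in cache:
--                 new[v] = cache[key]
--             else:
--                 total = 0
--                 for x, y in pairs:
--                     if x == v:
--                         total += counts.get(y, 1)
--                     elif y == v:
--                         total += counts.get(x, 1)
--                 new[v] = total
--         counts = new
--     return counts[previousValue]
-- ===== Notes on version B (the rewrite author's own statement) =====
-- stated objective: alternative
-- what changed: Replaces A's top-down memoized recursion, which threads and mutates a cache dict, by a bottom-up iterative DP over columns 0..currentIndex that keeps one per-level table mapping each needed boundary value to its count (base layer = 1); the return value is identical but B never writes to the caller's cache.
-- outside the precondition, e.g. on diveIntoTheNebula([], {}, 0, 5, {'5:0': 7}): A returns 7, B raises IndexError; on diveIntoTheNebula([3], {}, 0, 5, {'5:0': 7}): A returns 7, B raises KeyError; on diveIntoTheNebula([1, 2], {2: []}, 1, 5, {}): A returns 0, B raises KeyError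
import Mathlib
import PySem

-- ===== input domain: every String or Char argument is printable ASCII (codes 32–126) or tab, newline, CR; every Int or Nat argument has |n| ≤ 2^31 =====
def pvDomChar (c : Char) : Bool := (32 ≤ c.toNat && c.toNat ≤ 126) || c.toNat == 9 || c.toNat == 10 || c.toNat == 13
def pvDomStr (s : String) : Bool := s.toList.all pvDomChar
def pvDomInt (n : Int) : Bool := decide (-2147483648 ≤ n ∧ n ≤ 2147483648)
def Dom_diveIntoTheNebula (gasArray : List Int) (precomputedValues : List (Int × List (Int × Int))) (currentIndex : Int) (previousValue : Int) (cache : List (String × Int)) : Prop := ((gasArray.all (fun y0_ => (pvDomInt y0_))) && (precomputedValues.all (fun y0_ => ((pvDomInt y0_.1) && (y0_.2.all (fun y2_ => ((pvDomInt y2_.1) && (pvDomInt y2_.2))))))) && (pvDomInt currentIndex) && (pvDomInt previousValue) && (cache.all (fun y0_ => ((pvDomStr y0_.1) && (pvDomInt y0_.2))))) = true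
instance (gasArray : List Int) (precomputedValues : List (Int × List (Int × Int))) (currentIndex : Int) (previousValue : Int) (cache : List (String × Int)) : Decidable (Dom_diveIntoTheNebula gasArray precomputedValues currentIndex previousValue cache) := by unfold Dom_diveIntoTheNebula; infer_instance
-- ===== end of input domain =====

-- B replaces A's top-down memoized recursion (which mutates `cache`) by a bottom-up
-- iterative DP over columns; equivalence is about the RETURN value only (A mutates the
-- caller's cache dict, B never writes to it).

-- ===== PORT A =====
-- shared key builder: str(previousValue) + ":" + str(currentIndex)
def pvNebKey (v i : Int) : String := PySem.Int.toStr v ++ ":" ++ PySem.Int.toStr i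

mutual
-- the recursive body of A, threading the mutated cache dict through
def pvNebGoA (gas : List Int) (P : PySem.Dict Int (List (Int × Int))) (i v : Int)
    (c : PySem.Dict String Int) : Int × PySem.Dict String Int :=
  if i = -1 then (1, c)
  else
    match c.get? (pvNebKey v i) with
    | some n => (n, c)
    | none =>
      match hg : PySem.List.pyGet? gas i with
      | none => (0, c)      -- Python raises IndexError here (outside Pre_)
      | some gv =>
        match P.get? gv with
        | none => (0, c)    -- Python raises KeyError here (outside Pre_)
        | some pairs =>
          let r := pvNebLoopA gas P i v pairs c 0
            (by
              have h := (PySem.List.pyGet?_eq_none_iff (xs := gas) (i := i)).symm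
              by_contra hb
              have : PySem.List.pyGet? gas i = none := by
                rw [PySem.List.pyGet?_eq_none_iff]
                intro hr
                exact hb hr.1
              simp [this] at hg)
          (r.1, r.2.insert (pvNebKey v i) r.1)
termination_by ((i + gas.length + 2).toNat, 1, 0)
decreasing_by all_goals (first | exact Prod.Lex.right _ (Prod.Lex.left _ _ (by omega)) | exact Prod.Lex.left _ _ (by omega) | exact Prod.Lex.right _ (Prod.Lex.right _ (by simp only [List.length_cons]; omega)))

-- A's `for x, y in precomputedValues[gasArray[currentIndex]]` loop (hb only for termination)
def pvNebLoopA (gas : List Int) (P : PySem.Dict Int (List (Int × Int))) (i v : Int)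
    (pairs : List (Int × Int)) (c : PySem.Dict String Int) (acc : Int)
    (hb : -(gas.length : Int) ≤ i) : Int × PySem.Dict String Int :=
  match pairs with
  | [] => (acc, c)
  | (x, y) :: rest =>
    if x = v then
      let r := pvNebGoA gas P (i - 1) y c
      pvNebLoopA gas P i v rest r.2 (acc + r.1) hb
    else if y = v then
      let r := pvNebGoA gas P (i - 1) x c
      pvNebLoopA gas P i v rest r.2 (acc + r.1) hb
    else
      pvNebLoopA gas P i v rest c acc hb
termination_by ((i + gas.length + 2).toNat, 0, pairs.length)
decreasing_by all_goals (first | exact Prod.Lex.left _ _ (by omega) | exact Prod.Lex.right _ (Prod.Lex.right _ (by simp only [List.length_cons]; omega)))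
end

def diveIntoTheNebula (gasArray : List Int) (precomputedValues : List (Int × List (Int × Int))) (currentIndex : Int) (previousValue : Int) (cache : List (String × Int)) : Int :=
  (pvNebGoA gasArray (PySem.Dict.mk precomputedValues) currentIndex previousValue
    (PySem.Dict.mk cache)).1

-- ===== PORT B =====
-- {v for pair in pairs for v in pair}
def pvNebSupport (pairs : List (Int × Int)) : PySem.Set Int :=
  PySem.Set.ofList (pairs.flatMap (fun p => [p.1, p.2]))

-- the per-cell value: cached entry if present, else the sum over matching pairs
def pvNebCell (cd : PySem.Dict String Int) (counts : PySem.Dict Int Int)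
    (pairs : List (Int × Int)) (i v : Int) : Int :=
  match cd.get? (pvNebKey v i) with
  | some n => n
  | none =>
    pairs.foldl (fun acc p =>
      if p.1 = v then acc + counts.getD p.2 1
      else if p.2 = v then acc + counts.getD p.1 1
      else acc) 0

-- `new = {}; for v in targets: new[v] = …`
def pvNebLevel (cd : PySem.Dict String Int) (counts : PySem.Dict Int Int)
    (pairs : List (Int × Int)) (i : Int) (targets : List Int) : PySem.Dict Int Int :=
  targets.foldl (fun d v => d.insert v (pvNebCell cd counts pairs i v)) PySem.Dict.empty

-- one loop iteration; the state is `none` once the Python would have raised (outside Pre_)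
def pvNebStep (gasArray : List Int) (Pd : PySem.Dict Int (List (Int × Int)))
    (cd : PySem.Dict String Int) (currentIndex previousValue : Int)
    (st : Option (PySem.Dict Int Int)) (i : Int) : Option (PySem.Dict Int Int) :=
  match st with
  | none => none
  | some counts =>
    match PySem.List.pyGet? gasArray i with
    | none => none
    | some gv =>
      match Pd.get? gv with
      | none => none
      | some pairs =>
        if i = currentIndex then
          some (pvNebLevel cd counts pairs i [previousValue])
        else
          match PySem.List.pyGet? gasArray (i + 1) with
          | none => none
          | some gv2 =>
            match Pd.get? gv2 with
            | none => none
            | some pairs2 => some (pvNebLevel cd counts pairs i (pvNebSupport pairs2))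

def diveIntoTheNebula_alt (gasArray : List Int) (precomputedValues : List (Int × List (Int × Int))) (currentIndex : Int) (previousValue : Int) (cache : List (String × Int)) : Int :=
  if currentIndex = -1 then 1
  else
    let Pd := PySem.Dict.mk precomputedValues
    let cd := PySem.Dict.mk cache
    match (PySem.List.pyRange 0 (currentIndex + 1) 1).foldl
        (pvNebStep gasArray Pd cd currentIndex previousValue) (some PySem.Dict.empty) with
    | some counts =>
      match counts.get? previousValue with
      | some n => n
      | none => 0        -- Python KeyError, unreachable (final targets = {previousValue})
    | none => 0          -- Python raised earlier (outside Pre_)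

-- ===== PRECONDITION & SPEC =====
-- Pre_ restricts to well-formed instances: currentIndex ∈ [-1, len(gasArray)) and every
-- gas value of columns 0..currentIndex has an entry in precomputedValues. This is
-- narrower than "A returns": A can also return when a pre-seeded cache entry or a
-- zero-match pair list stops the recursion before it touches an invalid index / missing
-- key, a state B's bottom-up pass (which visits every column) does not reproduce.
def Pre_diveIntoTheNebula (gasArray : List Int) (precomputedValues : List (Int × List (Int × Int))) (currentIndex : Int) (previousValue : Int) (cache : List (String × Int)) : Prop :=
  -1 ≤ currentIndex ∧ (currentIndex = -1 ∨ currentIndex < (gasArray.length : Int)) ∧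
    (gasArray.take ((currentIndex + 1).toNat)).all
      (fun gv => (PySem.Dict.mk precomputedValues).contains gv) = true
instance (gasArray : List Int) (precomputedValues : List (Int × List (Int × Int))) (currentIndex : Int) (previousValue : Int) (cache : List (String × Int)) : Decidable (Pre_diveIntoTheNebula gasArray precomputedValues currentIndex previousValue cache) := by unfold Pre_diveIntoTheNebula; infer_instance

def pvWitness_diveIntoTheNebula : List Int × (List (Int × List (Int × Int))) × Int × Int × (List (String × Int)) :=
  ([0, 0], [(0, [(1, 2), (2, 3)])], 1, 1, [("junk", 5)])

def Spec_diveIntoTheNebula (gasArray : List Int) (precomputedValues : List (Int × List (Int × Int))) (currentIndex : Int) (previousValue : Int) (cache : List (String × Int)) (out : Int) : Prop := out = diveIntoTheNebula_alt gasArray precomputedValues currentIndex previousValue cache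
instance (gasArray : List Int) (precomputedValues : List (Int × List (Int × Int))) (currentIndex : Int) (previousValue : Int) (cache : List (String × Int)) (out : Int) : Decidable (Spec_diveIntoTheNebula gasArray precomputedValues currentIndex previousValue cache out) := by unfold Spec_diveIntoTheNebula; infer_instance

-- ===== CLAIM (what is proved, stated in full; the proofs are below) =====
def Claim_equal_diveIntoTheNebula : Prop := ∀ (gasArray : List Int) (precomputedValues : List (Int × List (Int × Int))) (currentIndex : Int) (previousValue : Int) (cache : List (String × Int)), Dom_diveIntoTheNebula gasArray precomputedValues currentIndex previousValue cache → Pre_diveIntoTheNebula gasArray precomputedValues currentIndex previousValue cache → Spec_diveIntoTheNebula gasArray precomputedValues currentIndex previousValue cache (diveIntoTheNebula gasArray precomputedValues currentIndex previousValue cache)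

-- ===== LEMMAS AND PROOFS =====

-- the common mathematical value: the pure memo-free recursion reading the INITIAL cache
mutual
def pvNebG (gas : List Int) (P : PySem.Dict Int (List (Int × Int)))
    (c0 : PySem.Dict String Int) (i v : Int) : Int :=
  if i = -1 then 1
  else
    match c0.get? (pvNebKey v i) with
    | some n => n
    | none =>
      match hg : PySem.List.pyGet? gas i with
      | none => 0
      | some gv =>
        match P.get? gv with
        | none => 0
        | some pairs =>
          pvNebGSum gas P c0 i v pairs
            (by
              by_contra hb
              have : PySem.List.pyGet? gas i = none := by
                rw [PySem.List.pyGet?_eq_none_iff]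
                intro hr
                exact hb hr.1
              simp [this] at hg)
termination_by ((i + gas.length + 2).toNat, 1, 0)
decreasing_by all_goals (first | exact Prod.Lex.right _ (Prod.Lex.left _ _ (by omega)) | exact Prod.Lex.left _ _ (by omega) | exact Prod.Lex.right _ (Prod.Lex.right _ (by simp only [List.length_cons]; omega)))

def pvNebGSum (gas : List Int) (P : PySem.Dict Int (List (Int × Int)))
    (c0 : PySem.Dict String Int) (i v : Int) (pairs : List (Int × Int))
    (hb : -(gas.length : Int) ≤ i) : Int :=
  match pairs with
  | [] => 0
  | (x, y) :: rest =>
    (if x = v then pvNebG gas P c0 (i - 1) y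
     else if y = v then pvNebG gas P c0 (i - 1) x else 0)
      + pvNebGSum gas P c0 i v rest hb
termination_by ((i + gas.length + 2).toNat, 0, pairs.length)
decreasing_by all_goals (first | exact Prod.Lex.left _ _ (by omega) | exact Prod.Lex.right _ (Prod.Lex.right _ (by simp only [List.length_cons]; omega)))
end


-- ---- str(n) produces digit/'-' characters only and is injective; hence pvNebKey is injective ----

def pvNebDec (cs : List Char) : Nat := cs.foldl (fun a c => a * 10 + (c.toNat - 48)) 0

theorem pvNebDec_append (cs : List Char) (c : Char) :
    pvNebDec (cs ++ [c]) = pvNebDec cs * 10 + (c.toNat - 48) := by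
  simp [pvNebDec]

theorem pvNeb_digitChar_val (d : Nat) (hd : d < 10) : (Nat.digitChar d).toNat - 48 = d := by
  interval_cases d <;> decide

theorem pvNebDec_toDigits (n : Nat) : pvNebDec (Nat.toDigits 10 n) = n := by
  induction n using Nat.strong_induction_on with
  | _ n IH =>
    rw [Nat.toDigits_eq_if (by norm_num)]
    by_cases h : n < 10
    · simp [h, pvNebDec, pvNeb_digitChar_val n h]
    · simp only [h, if_false]
      rw [pvNebDec_append, IH (n / 10) (by omega), pvNeb_digitChar_val (n % 10) (by omega)]
      omega

theorem pvNeb_toDigits_inj {m n : Nat} (h : Nat.toDigits 10 m = Nat.toDigits 10 n) : m = n := by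
  have := congrArg pvNebDec h
  rwa [pvNebDec_toDigits, pvNebDec_toDigits] at this

theorem pvNeb_toDigits_no_colon {n : Nat} {c : Char} (hc : c ∈ Nat.toDigits 10 n) : c ≠ ':' := by
  have := Nat.isDigit_of_mem_toDigits (by norm_num) (by norm_num) hc
  simp [Char.isDigit] at this
  intro hcc
  subst hcc
  simp [Char.le_def, Char.toNat] at this

theorem pvNeb_toDigits_no_minus {n : Nat} {c : Char} (hc : c ∈ Nat.toDigits 10 n) : c ≠ '-' := by
  have := Nat.isDigit_of_mem_toDigits (by norm_num) (by norm_num) hc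
  simp [Char.isDigit] at this
  intro hcc
  subst hcc
  simp [Char.le_def, Char.toNat] at this

theorem pvNeb_toChars_no_colon {n : Int} {c : Char} (hc : c ∈ PySem.Int.toChars n) : c ≠ ':' := by
  unfold PySem.Int.toChars at hc
  split at hc
  · rcases List.mem_cons.1 hc with h | h
    · subst h; decide
    · exact pvNeb_toDigits_no_colon h
  · exact pvNeb_toDigits_no_colon hc

theorem pvNeb_toChars_inj {m n : Int} (h : PySem.Int.toChars m = PySem.Int.toChars n) : m = n := by
  unfold PySem.Int.toChars at h
  split at h <;> split at h
  · rename_i hm hn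
    simp only [List.cons.injEq] at h
    have := pvNeb_toDigits_inj h.2
    omega
  · rename_i hm hn
    exfalso
    have hmem : '-' ∈ Nat.toDigits 10 n.toNat := by rw [← h]; exact List.mem_cons_self
    exact pvNeb_toDigits_no_minus hmem rfl
  · rename_i hm hn
    exfalso
    have hmem : '-' ∈ Nat.toDigits 10 m.toNat := by rw [h]; exact List.mem_cons_self
    exact pvNeb_toDigits_no_minus hmem rfl
  · rename_i hm hn
    have := pvNeb_toDigits_inj h
    omega

theorem pvNeb_colon_append_inj : ∀ (a a' b b' : List Char), ':' ∉ a → ':' ∉ a' →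
    a ++ ':' :: b = a' ++ ':' :: b' → a = a' ∧ b = b'
  | [], [], b, b', _, _, h => by simpa using h
  | [], c' :: a', b, b', _, ha', h => by
    simp only [List.nil_append, List.cons_append, List.cons.injEq] at h
    exact absurd (h.1.symm ▸ List.mem_cons_self) ha'
  | c :: a, [], b, b', ha, _, h => by
    simp only [List.nil_append, List.cons_append, List.cons.injEq] at h
    exact absurd (h.1 ▸ List.mem_cons_self) ha
  | c :: a, c' :: a', b, b', ha, ha', h => by
    simp only [List.cons_append, List.cons.injEq] at h
    have := pvNeb_colon_append_inj a a' b b'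
      (fun hm => ha (List.mem_cons_of_mem _ hm))
      (fun hm => ha' (List.mem_cons_of_mem _ hm)) h.2
    exact ⟨by simp [h.1, this.1], this.2⟩

theorem pvNebKey_inj {v i v' i' : Int} (h : pvNebKey v i = pvNebKey v' i') :
    v = v' ∧ i = i' := by
  unfold pvNebKey at h
  have hl := congrArg String.toList h
  simp only [String.toList_append, PySem.Int.toList_toStr] at hl
  have hcolon : (":" : String).toList = [':'] := rfl
  rw [hcolon] at hl
  have h2 := pvNeb_colon_append_inj _ _ _ _
    (fun hm => pvNeb_toChars_no_colon hm rfl)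
    (fun hm => pvNeb_toChars_no_colon hm rfl)
    (by simpa using hl)
  exact ⟨pvNeb_toChars_inj h2.1, pvNeb_toChars_inj h2.2⟩


-- ---- A computes pvNebG: memoization correctness ----

def pvNebInv (gas : List Int) (P : PySem.Dict Int (List (Int × Int)))
    (c0 c : PySem.Dict String Int) : Prop :=
  (∀ k n, c0.get? k = some n → c.get? k = some n) ∧
  (∀ v i n, i ≠ -1 → c.get? (pvNebKey v i) = some n → n = pvNebG gas P c0 i v)

theorem pvNebG_neg_one (gas : List Int) (P : PySem.Dict Int (List (Int × Int)))
    (c0 : PySem.Dict String Int) (v : Int) : pvNebG gas P c0 (-1) v = 1 := by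
  rw [pvNebG]; simp

theorem pvNebG_eq (gas : List Int) (P : PySem.Dict Int (List (Int × Int)))
    (c0 : PySem.Dict String Int) (i v : Int) (hi : i ≠ -1) {gv : Int}
    {pairs : List (Int × Int)} (hc : c0.get? (pvNebKey v i) = none)
    (hg : PySem.List.pyGet? gas i = some gv) (hP : P.get? gv = some pairs)
    (hb : -(gas.length : Int) ≤ i) :
    pvNebG gas P c0 i v = pvNebGSum gas P c0 i v pairs hb := by
  rw [pvNebG]
  simp only [hi, if_false, hc]
  split
  · rename_i h; rw [h] at hg; cases hg
  · rename_i gv' h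
    rw [h] at hg
    cases hg
    rw [hP]

theorem pvNebG_cached (gas : List Int) (P : PySem.Dict Int (List (Int × Int)))
    (c0 : PySem.Dict String Int) (i v n : Int) (hi : i ≠ -1)
    (hc : c0.get? (pvNebKey v i) = some n) : pvNebG gas P c0 i v = n := by
  rw [pvNebG]
  simp [hi, hc]

theorem pvNebG_idx_none (gas : List Int) (P : PySem.Dict Int (List (Int × Int)))
    (c0 : PySem.Dict String Int) (i v : Int) (hi : i ≠ -1)
    (hc : c0.get? (pvNebKey v i) = none)
    (hg : PySem.List.pyGet? gas i = none) : pvNebG gas P c0 i v = 0 := by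
  rw [pvNebG]
  simp only [hi, if_false, hc]
  split
  · rfl
  · rename_i gv h; rw [h] at hg; cases hg

theorem pvNebG_key_none (gas : List Int) (P : PySem.Dict Int (List (Int × Int)))
    (c0 : PySem.Dict String Int) (i v : Int) (hi : i ≠ -1) {gv : Int}
    (hc : c0.get? (pvNebKey v i) = none)
    (hg : PySem.List.pyGet? gas i = some gv)
    (hP : P.get? gv = none) : pvNebG gas P c0 i v = 0 := by
  rw [pvNebG]
  simp only [hi, if_false, hc]
  split
  · rename_i h; rw [h] at hg
  · rename_i gv' h
    rw [hg] at h
    cases h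
    simp [hP]

theorem pvNebLoopA_corr (gas : List Int) (P : PySem.Dict Int (List (Int × Int)))
    (c0 : PySem.Dict String Int) (i v : Int) (hb : -(gas.length : Int) ≤ i)
    (IH : ∀ (w : Int) (c : PySem.Dict String Int), pvNebInv gas P c0 c →
      (pvNebGoA gas P (i - 1) w c).1 = pvNebG gas P c0 (i - 1) w ∧
      pvNebInv gas P c0 (pvNebGoA gas P (i - 1) w c).2) :
    ∀ (pairs : List (Int × Int)) (c : PySem.Dict String Int) (acc : Int),
      pvNebInv gas P c0 c →
      (pvNebLoopA gas P i v pairs c acc hb).1 = acc + pvNebGSum gas P c0 i v pairs hb ∧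
      pvNebInv gas P c0 (pvNebLoopA gas P i v pairs c acc hb).2
  | [], c, acc, hinv => by
    rw [pvNebLoopA, pvNebGSum]
    exact ⟨by ring, hinv⟩
  | (x, y) :: rest, c, acc, hinv => by
    rw [pvNebLoopA, pvNebGSum]
    by_cases hx : x = v
    · simp only [hx, if_true]
      obtain ⟨h1, h2⟩ := IH y c hinv
      obtain ⟨h3, h4⟩ := pvNebLoopA_corr gas P c0 i v hb IH rest _ _ h2
      refine ⟨?_, h4⟩
      rw [h3, h1]
      ring
    · by_cases hy : y = v
      · simp only [hx, hy, if_false, if_true]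
        obtain ⟨h1, h2⟩ := IH x c hinv
        obtain ⟨h3, h4⟩ := pvNebLoopA_corr gas P c0 i v hb IH rest _ _ h2
        refine ⟨?_, h4⟩
        rw [h3, h1]
        ring
      · simp only [hx, hy, if_false]
        obtain ⟨h3, h4⟩ := pvNebLoopA_corr gas P c0 i v hb IH rest _ _ hinv
        refine ⟨by rw [h3]; ring, h4⟩

theorem pvNebGoA_corr (gas : List Int) (P : PySem.Dict Int (List (Int × Int)))
    (c0 : PySem.Dict String Int) :
    ∀ (N : Nat) (i v : Int) (c : PySem.Dict String Int),
      (i + gas.length + 2).toNat ≤ N → pvNebInv gas P c0 c →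
      (pvNebGoA gas P i v c).1 = pvNebG gas P c0 i v ∧
      pvNebInv gas P c0 (pvNebGoA gas P i v c).2 := by
  intro N
  induction N using Nat.strong_induction_on with
  | _ N IHN =>
    intro i v c hN hinv
    rw [pvNebGoA]
    by_cases hi : i = -1
    · subst hi
      simp only [if_true]
      exact ⟨by simpa using (pvNebG_neg_one gas P c0 v).symm, hinv⟩
    · simp only [hi, if_false]
      split
      · rename_i n hcc
        have hG := hinv.2 v i n hi hcc
        exact ⟨by simpa using hG, hinv⟩
      · rename_i hcc
        have hc0 : c0.get? (pvNebKey v i) = none := by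
          cases h0 : c0.get? (pvNebKey v i) with
          | none => rfl
          | some m => rw [hinv.1 _ _ h0] at hcc; cases hcc
        split
        · rename_i hg
          refine ⟨?_, hinv⟩
          simp [pvNebG_idx_none gas P c0 i v hi hc0 hg]
        · rename_i gv hg
          have hb : -(gas.length : Int) ≤ i := by
            by_contra hbx
            have : PySem.List.pyGet? gas i = none := by
              rw [PySem.List.pyGet?_eq_none_iff]
              intro hr
              exact hbx hr.1
            rw [this] at hg
            cases hg
          split
          · rename_i hP
            refine ⟨?_, hinv⟩
            simp [pvNebG_key_none gas P c0 i v hi hc0 hg hP]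
          · rename_i pairs hP
            have IH : ∀ (w : Int) (c' : PySem.Dict String Int), pvNebInv gas P c0 c' →
                (pvNebGoA gas P (i - 1) w c').1 = pvNebG gas P c0 (i - 1) w ∧
                pvNebInv gas P c0 (pvNebGoA gas P (i - 1) w c').2 := by
              intro w c' hinv'
              exact IHN (N - 1) (by omega) (i - 1) w c' (by omega) hinv'
            obtain ⟨h1, h2⟩ := pvNebLoopA_corr gas P c0 i v hb IH pairs c 0 hinv
            have hval : (pvNebLoopA gas P i v pairs c 0 hb).1 = pvNebG gas P c0 i v := by
              rw [h1, zero_add, pvNebG_eq gas P c0 i v hi hc0 hg hP hb]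
            refine ⟨hval, ?_, ?_⟩
            · intro k n hk
              dsimp only at hk ⊢
              have hck := h2.1 k n hk
              by_cases hkey : k = pvNebKey v i
              · exfalso
                rw [hkey, hc0] at hk
                cases hk
              · rw [PySem.Dict.get?_insert_of_ne _ _ hkey]
                exact hck
            · intro v' i' n hi' hk
              dsimp only at hk ⊢
              by_cases hkey : pvNebKey v' i' = pvNebKey v i
              · obtain ⟨hv, hii⟩ := pvNebKey_inj hkey
                subst hv; subst hii
                rw [PySem.Dict.get?_insert_self] at hk
                cases hk
                exact hval
              · rw [PySem.Dict.get?_insert_of_ne _ _ hkey] at hk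
                exact h2.2 v' i' n hi' hk


-- ---- B computes pvNebG: bottom-up level induction ----

theorem pvNeb_foldl_insert_get? (f : Int → Int) :
    ∀ (ts : List Int) (d : PySem.Dict Int Int) (v : Int),
      (ts.foldl (fun d w => d.insert w (f w)) d).get? v
        = if v ∈ ts then some (f v) else d.get? v
  | [], d, v => by simp
  | t :: ts, d, v => by
    rw [List.foldl_cons, pvNeb_foldl_insert_get? f ts _ v]
    by_cases hv : v ∈ ts
    · simp [hv, List.mem_cons]
    · by_cases hvt : v = t
      · subst hvt
        simp [hv, PySem.Dict.get?_insert_self]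
      · simp [hv, hvt, List.mem_cons, PySem.Dict.get?_insert_of_ne _ _ hvt]

theorem pvNeb_mem_support {pairs : List (Int × Int)} {p : Int × Int} (hp : p ∈ pairs) :
    p.1 ∈ pvNebSupport pairs ∧ p.2 ∈ pvNebSupport pairs := by
  unfold pvNebSupport
  constructor <;>
    · rw [PySem.Set.mem_ofList, List.mem_flatMap]
      exact ⟨p, hp, by simp⟩

theorem pvNeb_foldl_sum (gas : List Int) (P : PySem.Dict Int (List (Int × Int)))
    (c0 : PySem.Dict String Int) (i v : Int) (counts : PySem.Dict Int Int)
    (hb : -(gas.length : Int) ≤ i) :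
    ∀ (pairs : List (Int × Int)) (acc : Int),
      (∀ p ∈ pairs, counts.getD p.1 1 = pvNebG gas P c0 (i - 1) p.1 ∧
        counts.getD p.2 1 = pvNebG gas P c0 (i - 1) p.2) →
      pairs.foldl (fun acc p =>
          if p.1 = v then acc + counts.getD p.2 1
          else if p.2 = v then acc + counts.getD p.1 1
          else acc) acc
        = acc + pvNebGSum gas P c0 i v pairs hb
  | [], acc, _ => by rw [List.foldl_nil, pvNebGSum]; ring
  | (x, y) :: rest, acc, hcnt => by
    rw [List.foldl_cons, pvNebGSum]
    have hxy := hcnt (x, y) List.mem_cons_self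
    have hrest := fun p hp => hcnt p (List.mem_cons_of_mem _ hp)
    rw [pvNeb_foldl_sum gas P c0 i v counts hb rest _ hrest]
    by_cases hx : x = v
    · simp only [hx, if_true]
      rw [hxy.2]
      ring
    · by_cases hy : y = v
      · simp only [hx, hy, if_false, if_true]
        rw [hxy.1]
        ring
      · simp only [hx, hy, if_false]
        ring

theorem pvNebCell_eq (gas : List Int) (P : PySem.Dict Int (List (Int × Int)))
    (cd : PySem.Dict String Int) (counts : PySem.Dict Int Int)
    (pairs : List (Int × Int)) (i v gv : Int) (hi : i ≠ -1)
    (hg : PySem.List.pyGet? gas i = some gv) (hP : P.get? gv = some pairs)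
    (hcnt : ∀ y ∈ pvNebSupport pairs, counts.getD y 1 = pvNebG gas P cd (i - 1) y) :
    pvNebCell cd counts pairs i v = pvNebG gas P cd i v := by
  have hb : -(gas.length : Int) ≤ i := by
    by_contra hbx
    have : PySem.List.pyGet? gas i = none := by
      rw [PySem.List.pyGet?_eq_none_iff]
      intro hr
      exact hbx hr.1
    rw [this] at hg
    cases hg
  unfold pvNebCell
  cases hc : cd.get? (pvNebKey v i) with
  | some n => exact (pvNebG_cached gas P cd i v n hi hc).symm
  | none =>
    rw [pvNebG_eq gas P cd i v hi hc hg hP hb]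
    rw [pvNeb_foldl_sum gas P cd i v counts hb pairs 0
      (fun p hp => ⟨hcnt p.1 (pvNeb_mem_support hp).1, hcnt p.2 (pvNeb_mem_support hp).2⟩)]
    ring

-- the target list B uses at level j (as pvNebStep computes it)
def pvNebTgts (gas : List Int) (Pd : PySem.Dict Int (List (Int × Int))) (ci pv : Int)
    (j : Int) : List Int :=
  if j = ci then [pv]
  else
    match PySem.List.pyGet? gas (j + 1) with
    | none => []
    | some gv2 =>
      match Pd.get? gv2 with
      | none => []
      | some pairs2 => pvNebSupport pairs2

theorem pvNebLevel_get (cd : PySem.Dict String Int) (counts : PySem.Dict Int Int)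
    (pairs : List (Int × Int)) (j : Int) (targets : List Int) (v : Int)
    (hv : v ∈ targets) :
    (pvNebLevel cd counts pairs j targets).get? v
      = some (pvNebCell cd counts pairs j v) := by
  unfold pvNebLevel
  rw [pvNeb_foldl_insert_get? (fun w => pvNebCell cd counts pairs j w) targets _ v]
  simp [hv]

theorem pvNebStep_ok (gas : List Int) (Pd : PySem.Dict Int (List (Int × Int)))
    (cd : PySem.Dict String Int) (ci pv j gv : Int) (pairs : List (Int × Int))
    (counts : PySem.Dict Int Int) (hj0 : 0 ≤ j)
    (hg : PySem.List.pyGet? gas j = some gv) (hP : Pd.get? gv = some pairs)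
    (hwf2 : j ≠ ci → ∃ gv2 pairs2, PySem.List.pyGet? gas (j + 1) = some gv2 ∧
      Pd.get? gv2 = some pairs2)
    (hcnt : ∀ y ∈ pvNebSupport pairs, counts.getD y 1 = pvNebG gas Pd cd (j - 1) y) :
    ∃ d', pvNebStep gas Pd cd ci pv (some counts) j = some d' ∧
      ∀ v ∈ pvNebTgts gas Pd ci pv j, d'.get? v = some (pvNebG gas Pd cd j v) := by
  have hi : j ≠ -1 := by omega
  by_cases hjc : j = ci
  · subst hjc
    refine ⟨pvNebLevel cd counts pairs j [pv], ?_, ?_⟩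
    · simp [pvNebStep, hg, hP]
    · intro v hv
      simp only [pvNebTgts, if_pos rfl] at hv
      rw [pvNebLevel_get cd counts pairs j [pv] v hv]
      rw [pvNebCell_eq gas Pd cd counts pairs j v gv hi hg hP hcnt]
  · obtain ⟨gv2, pairs2, hg2, hP2⟩ := hwf2 hjc
    refine ⟨pvNebLevel cd counts pairs j (pvNebSupport pairs2), ?_, ?_⟩
    · simp only [pvNebStep, hg, hP, hjc, if_false, hg2, hP2]
    · intro v hv
      rw [pvNebTgts] at hv
      simp only [hjc, if_false, hg2, hP2] at hv
      rw [pvNebLevel_get cd counts pairs j (pvNebSupport pairs2) v hv]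
      rw [pvNebCell_eq gas Pd cd counts pairs j v gv hi hg hP hcnt]

theorem pvNebB_loop (gas : List Int) (Pd : PySem.Dict Int (List (Int × Int)))
    (cd : PySem.Dict String Int) (ci pv : Int) (hci : 0 ≤ ci)
    (hwf : ∀ j : Nat, (j : Int) ≤ ci → ∃ gv pairs,
      PySem.List.pyGet? gas (j : Int) = some gv ∧ Pd.get? gv = some pairs) :
    ∀ m : Nat, (m : Int) ≤ ci →
      ∃ d, (PySem.List.pyRange 0 ((m : Int) + 1) 1).foldl
          (pvNebStep gas Pd cd ci pv) (some PySem.Dict.empty) = some d ∧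
        ∀ v ∈ pvNebTgts gas Pd ci pv (m : Int),
          d.get? v = some (pvNebG gas Pd cd (m : Int) v) := by
  intro m
  induction m with
  | zero =>
    intro hm
    simp only [Nat.cast_zero, zero_add]
    obtain ⟨gv, pairs, hg, hP⟩ := hwf 0 (by exact_mod_cast hm)
    simp only [Nat.cast_zero] at hg
    have hwf2 : (0 : Int) ≠ ci → ∃ gv2 pairs2,
        PySem.List.pyGet? gas ((0 : Int) + 1) = some gv2 ∧ Pd.get? gv2 = some pairs2 := by
      intro hne
      obtain ⟨gv2, pairs2, hg2, hP2⟩ := hwf 1 (by exact_mod_cast (by omega : (1 : Int) ≤ ci))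
      exact ⟨gv2, pairs2, by exact_mod_cast hg2, hP2⟩
    have hcnt : ∀ y ∈ pvNebSupport pairs,
        PySem.Dict.empty.getD y 1 = pvNebG gas Pd cd ((0 : Int) - 1) y := by
      intro y _
      rw [PySem.Dict.getD_empty]
      norm_num [pvNebG_neg_one]
    obtain ⟨d, hstep, hd⟩ := pvNebStep_ok gas Pd cd ci pv 0 gv pairs
      PySem.Dict.empty le_rfl hg hP hwf2 hcnt
    refine ⟨d, ?_, hd⟩
    have hr : PySem.List.pyRange 0 1 = [0] := by decide
    rw [hr, List.foldl_cons, List.foldl_nil]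
    exact hstep
  | succ m IHm =>
    intro hm
    have hmci : (m : Int) < ci := by push_cast at hm; omega
    obtain ⟨d, hfold, hd⟩ := IHm (by omega)
    obtain ⟨gv1, pairs1, hg1, hP1⟩ := hwf (m + 1) (by push_cast; omega)
    have hg1' : PySem.List.pyGet? gas ((m : Int) + 1) = some gv1 := by
      push_cast at hg1; exact hg1
    -- at level m (< ci) the targets ARE the support of level m+1's pair list
    have htgts : pvNebTgts gas Pd ci pv (m : Int) = pvNebSupport pairs1 := by
      rw [pvNebTgts]
      simp only [hg1', hP1]
      rw [if_neg (by omega : ¬ ((m : Int) = ci))]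
    have hcnt : ∀ y ∈ pvNebSupport pairs1,
        d.getD y 1 = pvNebG gas Pd cd (((m : Int) + 1) - 1) y := by
      intro y hy
      have := hd y (by rw [htgts]; exact hy)
      rw [PySem.Dict.getD_of_get?_eq_some _ 1 this]
      norm_num
    have hwf2 : ((m : Int) + 1) ≠ ci → ∃ gv2 pairs2,
        PySem.List.pyGet? gas (((m : Int) + 1) + 1) = some gv2 ∧
          Pd.get? gv2 = some pairs2 := by
      intro hne
      obtain ⟨gv2, pairs2, hg2, hP2⟩ := hwf (m + 2) (by push_cast at hm ⊢; omega)
      exact ⟨gv2, pairs2, by push_cast at hg2 ⊢; exact hg2, hP2⟩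
    obtain ⟨d', hstep, hd'⟩ := pvNebStep_ok gas Pd cd ci pv ((m : Int) + 1) gv1 pairs1
      d (by omega) hg1' hP1 hwf2 hcnt
    refine ⟨d', ?_, ?_⟩
    · push_cast
      rw [PySem.List.pyRange_one_succ_right (by omega : (0 : Int) ≤ (m : Int) + 1)]
      rw [List.foldl_append, hfold]
      simpa using hstep
    · intro v hv
      push_cast at hv ⊢
      exact hd' v hv

-- ===== VERDICT (by name: the statement is the Claim_ definition above) =====
theorem diveIntoTheNebula_spec : Claim_equal_diveIntoTheNebula := by
  unfold Claim_equal_diveIntoTheNebula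
  intro gas P ci pv cache _hdom hpre
  unfold Spec_diveIntoTheNebula
  obtain ⟨h1, h2, h3⟩ := hpre
  have hA : diveIntoTheNebula gas P ci pv cache
      = pvNebG gas (PySem.Dict.mk P) (PySem.Dict.mk cache) ci pv := by
    unfold diveIntoTheNebula
    have hinv : pvNebInv gas (PySem.Dict.mk P) (PySem.Dict.mk cache) (PySem.Dict.mk cache) :=
      ⟨fun k n h => h,
       fun v i n hi hk => (pvNebG_cached gas (PySem.Dict.mk P) (PySem.Dict.mk cache) i v n hi hk).symm⟩
    exact (pvNebGoA_corr gas (PySem.Dict.mk P) (PySem.Dict.mk cache)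
      ((ci + gas.length + 2).toNat) ci pv (PySem.Dict.mk cache) le_rfl hinv).1
  rw [hA]
  by_cases hci : ci = -1
  · subst hci
    unfold diveIntoTheNebula_alt
    simp [pvNebG_neg_one]
  · have hci0 : 0 ≤ ci := by omega
    have hcilen : ci < (gas.length : Int) := by
      rcases h2 with h | h
      · omega
      · exact h
    have hwf : ∀ j : Nat, (j : Int) ≤ ci → ∃ gv pairs,
        PySem.List.pyGet? gas (j : Int) = some gv ∧
          (PySem.Dict.mk P).get? gv = some pairs := by
      intro j hj
      have hjlen : j < gas.length := by
        have : (j : Int) < (gas.length : Int) := lt_of_le_of_lt hj hcilen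
        exact_mod_cast this
      have hg : PySem.List.pyGet? gas (j : Int) = some gas[j] := by
        rw [PySem.List.pyGet?_natCast]
        exact List.getElem?_eq_getElem hjlen
      have hjtake : j < (gas.take ((ci + 1).toNat)).length := by
        rw [List.length_take]
        omega
      have hmem : gas[j] ∈ gas.take ((ci + 1).toNat) := by
        have hel : (gas.take ((ci + 1).toNat))[j] = gas[j] := List.getElem_take
        rw [← hel]
        exact List.getElem_mem hjtake
      have hcont := (List.all_eq_true.mp h3) _ hmem
      rw [PySem.Dict.contains_eq_isSome_get?] at hcont
      obtain ⟨pairs, hpairs⟩ := Option.isSome_iff_exists.mp hcont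
      exact ⟨gas[j], pairs, hg, hpairs⟩
    obtain ⟨d, hfold, hd⟩ := pvNebB_loop gas (PySem.Dict.mk P) (PySem.Dict.mk cache)
      ci pv hci0 hwf ci.toNat (by rw [Int.toNat_of_nonneg hci0])
    rw [Int.toNat_of_nonneg hci0] at hfold hd
    have hpv : d.get? pv = some (pvNebG gas (PySem.Dict.mk P) (PySem.Dict.mk cache) ci pv) := by
      apply hd
      rw [pvNebTgts]
      simp
    unfold diveIntoTheNebula_alt
    simp only [hci, if_false, hfold, hpv]
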